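-- pv_equiv track=rewrite | github.com/jlillywh/precipgen_par | random_walk_params.py | _estimate_seasonal_days
-- ===== SOURCE A (Python) =====
-- from typing import Dict, List, Optional, Tuple
--
-- def _estimate_seasonal_days(start_year: int, end_year: int, season_months: List[int]) -> int:
--     """
--     Estimate the expected number of days for a season across multiple years.
--
--     Parameters
--     ----------
--     start_year : int
--         Start year of window
--     end_year : int
--         End year of window
--     season_months : List[int]
--         List of month numbers for the season
--
--     Returns
--     -------
--     int
--         Estimated number of seasonal days
--     """
--     total_days = 0
--
--     for year in range(start_year, end_year + 1):
--         for month in season_months: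
--             if month == 2:  # February
--                 # Check for leap year
--                 if (year % 4 == 0 and year % 100 != 0) or (year % 400 == 0):
--                     total_days += 29
--                 else:
--                     total_days += 28
--             elif month in [4, 6, 9, 11]:  # April, June, September, November
--                 total_days += 30
--             else:  # All other months
--                 total_days += 31
--
--     return total_days
-- ===== SOURCE B (Python) =====
-- from typing import List
--
-- def _estimate_seasonal_days(start_year: int, end_year: int, season_months: List[int]) -> int:
--     # Closed form: no per-year loop; leap years counted with floor-division formula.
--     years = end_year - start_year + 1
--     if years <= 0:
--         return 0
--
--     def leaps_upto(n: int) -> int: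
--         return n // 4 - n // 100 + n // 400
--
--     leaps = leaps_upto(end_year) - leaps_upto(start_year - 1)
--     total = 0
--     for m in season_months:
--         if m == 2:
--             total += 28 * years + leaps
--         elif m in (4, 6, 9, 11):
--             total += 30 * years
--         else:
--             total += 31 * years
--     return total
-- ===== Notes on version B (the rewrite author's own statement) =====
-- stated objective: alternative
-- what changed: Replaced the per-year loop (leap test repeated for every year) by a closed form: one pass over the months, with the leap-year count over the year range computed by the floor-division formula n//4 - n//100 + n//400; intended as faster, but a timing run could not confirm it on every large input.
import Mathlib
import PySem

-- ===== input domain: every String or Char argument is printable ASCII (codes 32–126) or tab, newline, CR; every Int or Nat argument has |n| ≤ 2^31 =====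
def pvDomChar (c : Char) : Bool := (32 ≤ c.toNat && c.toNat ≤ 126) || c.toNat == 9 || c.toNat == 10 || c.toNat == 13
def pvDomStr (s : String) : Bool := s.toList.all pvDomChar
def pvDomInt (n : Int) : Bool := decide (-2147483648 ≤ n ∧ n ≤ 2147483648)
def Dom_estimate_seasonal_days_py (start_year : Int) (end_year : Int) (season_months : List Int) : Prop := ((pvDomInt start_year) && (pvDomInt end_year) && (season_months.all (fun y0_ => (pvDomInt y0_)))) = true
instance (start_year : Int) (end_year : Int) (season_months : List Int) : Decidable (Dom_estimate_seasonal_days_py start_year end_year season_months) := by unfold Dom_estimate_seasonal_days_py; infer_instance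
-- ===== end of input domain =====

-- B replaces A's per-year loop by a closed form: one pass over the months, with the
-- leap-year count over the year range obtained from the floor-division formula.

-- ===== PORT A =====
def estimate_seasonal_days_py (start_year : Int) (end_year : Int) (season_months : List Int) : Int :=
  (PySem.List.pyRange start_year (end_year + 1) 1).foldl
    (fun total_days year =>
      season_months.foldl
        (fun total_days month =>
          if month == 2 then
            if (PySem.Int.mod year 4 == 0 && PySem.Int.mod year 100 != 0) || PySem.Int.mod year 400 == 0
            then total_days + 29
            else total_days + 28
          else if ([4, 6, 9, 11] : List Int).contains month then
            total_days + 30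
          else
            total_days + 31)
        total_days)
    0

-- ===== PORT B =====
def pvLeapsUpto (n : Int) : Int :=
  PySem.Int.floordiv n 4 - PySem.Int.floordiv n 100 + PySem.Int.floordiv n 400

def estimate_seasonal_days_py_alt (start_year : Int) (end_year : Int) (season_months : List Int) : Int :=
  let years := end_year - start_year + 1
  if years ≤ 0 then 0
  else
    let leaps := pvLeapsUpto end_year - pvLeapsUpto (start_year - 1)
    season_months.foldl
      (fun total m =>
        if m == 2 then total + (28 * years + leaps)
        else if m == 4 || m == 6 || m == 9 || m == 11 then total + 30 * years
        else total + 31 * years)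
      0

-- ===== PRECONDITION & SPEC =====
def Spec_estimate_seasonal_days_py (start_year : Int) (end_year : Int) (season_months : List Int) (out : Int) : Prop := out = estimate_seasonal_days_py_alt start_year end_year season_months
instance (start_year : Int) (end_year : Int) (season_months : List Int) (out : Int) : Decidable (Spec_estimate_seasonal_days_py start_year end_year season_months out) := by unfold Spec_estimate_seasonal_days_py; infer_instance

-- ===== CLAIM (what is proved, stated in full; the proofs are below) =====
def Claim_equal_estimate_seasonal_days_py : Prop := ∀ (start_year : Int) (end_year : Int) (season_months : List Int), Dom_estimate_seasonal_days_py start_year end_year season_months → Spec_estimate_seasonal_days_py start_year end_year season_months (estimate_seasonal_days_py start_year end_year season_months)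

-- ===== LEMMAS AND PROOFS =====

-- A's leap-year test, named for the proofs
def pvLeapB (y : Int) : Bool :=
  (PySem.Int.mod y 4 == 0 && PySem.Int.mod y 100 != 0) || PySem.Int.mod y 400 == 0

-- day count of month m outside February's leap day
def pvBase (m : Int) : Int :=
  if m = 2 then 28 else if m = 4 ∨ m = 6 ∨ m = 9 ∨ m = 11 then 30 else 31

-- 1 for February, else 0
def pvFeb (m : Int) : Int := if m = 2 then 1 else 0

-- the floor-division leap counter steps by exactly A's leap test
lemma pvLeap_step (y : Int) :
    pvLeapsUpto y - pvLeapsUpto (y - 1) = if pvLeapB y then 1 else 0 := by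
  unfold pvLeapsUpto pvLeapB
  rw [PySem.Int.floordiv_eq_ediv_of_pos (by norm_num : (0:Int) < 4),
      PySem.Int.floordiv_eq_ediv_of_pos (by norm_num : (0:Int) < 100),
      PySem.Int.floordiv_eq_ediv_of_pos (by norm_num : (0:Int) < 400),
      PySem.Int.floordiv_eq_ediv_of_pos (by norm_num : (0:Int) < 4),
      PySem.Int.floordiv_eq_ediv_of_pos (by norm_num : (0:Int) < 100),
      PySem.Int.floordiv_eq_ediv_of_pos (by norm_num : (0:Int) < 400),
      PySem.Int.mod_eq_emod_of_pos (by norm_num : (0:Int) < 4),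
      PySem.Int.mod_eq_emod_of_pos (by norm_num : (0:Int) < 100),
      PySem.Int.mod_eq_emod_of_pos (by norm_num : (0:Int) < 400)]
  by_cases h4 : y % 4 = 0 <;> by_cases h100 : y % 100 = 0 <;> by_cases h400 : y % 400 = 0 <;>
    simp [h4, h100, h400] <;> omega

-- A's inner fold over the months, per year
lemma pvInnerA (y : Int) : ∀ (ms : List Int) (acc : Int),
    ms.foldl
      (fun total_days month =>
        if month == 2 then
          if (PySem.Int.mod y 4 == 0 && PySem.Int.mod y 100 != 0) || PySem.Int.mod y 400 == 0
          then total_days + 29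
          else total_days + 28
        else if ([4, 6, 9, 11] : List Int).contains month then
          total_days + 30
        else
          total_days + 31)
      acc
    = acc + (ms.map pvBase).sum + (if pvLeapB y then (ms.map pvFeb).sum else 0) := by
  intro ms
  induction ms with
  | nil => intro acc; simp
  | cons m tl ih =>
    intro acc
    rw [List.foldl_cons, List.map_cons, List.map_cons, List.sum_cons, List.sum_cons]
    by_cases h2 : (m == 2) = true
    · have hm : m = 2 := by simpa using h2
      rw [if_pos h2, ih]
      rcases hl : pvLeapB y with _ | _ <;>
        [have hl' : ((PySem.Int.mod y 4 == 0 && PySem.Int.mod y 100 != 0) ||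
            PySem.Int.mod y 400 == 0) = false := hl;
         have hl' : ((PySem.Int.mod y 4 == 0 && PySem.Int.mod y 100 != 0) ||
            PySem.Int.mod y 400 == 0) = true := hl] <;>
        rw [hl'] <;> simp [pvBase, pvFeb, hm] <;> ring
    · have hm : ¬ m = 2 := by simpa using h2
      rw [if_neg h2]
      by_cases hc : (([4, 6, 9, 11] : List Int).contains m) = true
      · have h30 : m = 4 ∨ m = 6 ∨ m = 9 ∨ m = 11 := by simpa using hc
        rw [if_pos hc, ih]
        rcases hl : pvLeapB y <;> simp [pvBase, pvFeb, hm, h30] <;> ring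
      · have h30 : ¬ (m = 4 ∨ m = 6 ∨ m = 9 ∨ m = 11) := by simpa using hc
        rw [if_neg hc, ih]
        rcases hl : pvLeapB y <;> simp [pvBase, pvFeb, hm, h30] <;> ring

-- the outer fold over the year range, in closed form
lemma pvOuter (B C : Int) : ∀ (n : Nat) (s e : Int), (e + 1 - s).toNat = n →
    (PySem.List.pyRange s (e + 1) 1).foldl
      (fun acc y => acc + B + (if pvLeapB y then C else 0)) 0
    = (if e - s + 1 ≤ 0 then 0
       else (e - s + 1) * B + (pvLeapsUpto e - pvLeapsUpto (s - 1)) * C) := by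
  intro n
  induction n with
  | zero =>
    intro s e h
    have hse : e - s + 1 ≤ 0 := by omega
    rw [PySem.List.pyRange_one]
    simp [h, hse]
  | succ n ih =>
    intro s e h
    have hse : s ≤ e := by omega
    rw [PySem.List.pyRange_one_succ_right hse, List.foldl_append,
        show PySem.List.pyRange s e = PySem.List.pyRange s (e - 1 + 1) by norm_num,
        ih s (e - 1) (by omega), List.foldl_cons, List.foldl_nil]
    have hstep := pvLeap_step e
    have hne : ¬ (e - s + 1 ≤ 0) := by omega
    rw [if_neg hne]
    by_cases hb : (e - 1) - s + 1 ≤ 0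
    · have hs : s = e := by omega
      rw [if_pos hb]
      subst hs
      rw [hstep]
      split <;> ring
    · rw [if_neg hb]
      rcases hl : pvLeapB e with _ | _ <;> simp only [hl] at hstep ⊢ <;>
        norm_num at hstep ⊢ <;> linear_combination (-1) * C * hstep

-- B's single fold over the months, in closed form
lemma pvInnerB (Y L : Int) : ∀ (ms : List Int) (acc : Int),
    ms.foldl
      (fun total m =>
        if m == 2 then total + (28 * Y + L)
        else if m == 4 || m == 6 || m == 9 || m == 11 then total + 30 * Y
        else total + 31 * Y)
      acc
    = acc + (ms.map pvBase).sum * Y + (ms.map pvFeb).sum * L := by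
  intro ms
  induction ms with
  | nil => intro acc; simp
  | cons m tl ih =>
    intro acc
    rw [List.foldl_cons, List.map_cons, List.map_cons, List.sum_cons, List.sum_cons]
    by_cases h2 : (m == 2) = true
    · have hm : m = 2 := by simpa using h2
      rw [if_pos h2, ih]; simp [pvBase, pvFeb, hm]; ring
    · have hm : ¬ m = 2 := by simpa using h2
      rw [if_neg h2]
      by_cases hc : (m == 4 || m == 6 || m == 9 || m == 11) = true
      · have h30 : m = 4 ∨ m = 6 ∨ m = 9 ∨ m = 11 := by simp at hc; tauto
        rw [if_pos hc, ih]; simp [pvBase, pvFeb, hm, h30]; ring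
      · have h30 : ¬ (m = 4 ∨ m = 6 ∨ m = 9 ∨ m = 11) := by simp at hc; tauto
        rw [if_neg hc, ih]; simp [pvBase, pvFeb, hm, h30]; ring

-- ===== VERDICT (by name: the statement is the Claim_ definition above) =====
theorem estimate_seasonal_days_py_spec : Claim_equal_estimate_seasonal_days_py := by
  intro s e ms _
  unfold Spec_estimate_seasonal_days_py estimate_seasonal_days_py estimate_seasonal_days_py_alt
  have hA : ∀ (init : Int),
      (PySem.List.pyRange s (e + 1) 1).foldl
        (fun total_days year =>
          ms.foldl
            (fun total_days month =>
              if month == 2 then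
                if (PySem.Int.mod year 4 == 0 && PySem.Int.mod year 100 != 0) || PySem.Int.mod year 400 == 0
                then total_days + 29
                else total_days + 28
              else if ([4, 6, 9, 11] : List Int).contains month then
                total_days + 30
              else
                total_days + 31)
            total_days)
        init
      = (PySem.List.pyRange s (e + 1) 1).foldl
          (fun acc y => acc + (ms.map pvBase).sum + (if pvLeapB y then (ms.map pvFeb).sum else 0)) init := by
    intro init
    exact PySem.List.foldl_congr_mem _ _ _ init (fun acc y _ => pvInnerA y ms acc)
  rw [hA 0, pvOuter ((ms.map pvBase).sum) ((ms.map pvFeb).sum) (e + 1 - s).toNat s e rfl]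
  by_cases hy : e - s + 1 ≤ 0
  · simp [hy]
  · simp only [hy, if_false]
    rw [pvInnerB (e - s + 1) (pvLeapsUpto e - pvLeapsUpto (s - 1)) ms 0]
    ring
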